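-- pv_equiv track=rewrite | github.com/banyan-team/banyan-python | banyan/banyan/utils_future_computation.py | _get_future_ids_to_abbrevs
-- ===== SOURCE A (Python) =====
-- from typing import Any, Dict, List, Optional, Set, Union
--
-- FutureId = str
--
-- def _get_future_ids_to_abbrevs(
--     future_ids: Set[FutureId],
-- ) -> Dict[FutureId, str]:
--     if len(future_ids) == 0:
--         return {}
--     fid_len = max([len(fid) for fid in future_ids])
--     for abbrev_len in range(len("bn_fut_") + 1, fid_len + 1):
--         future_id_abbrevs = set([fid[0:abbrev_len] for fid in future_ids])
--         if len(future_id_abbrevs) == len(future_ids):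
--             fid_len = abbrev_len
--             break
--     future_ids_to_abbrevs = {fid: fid[0:fid_len] for fid in future_ids}
--     return future_ids_to_abbrevs
-- ===== SOURCE B (Python) =====
-- def _get_future_ids_to_abbrevs(future_ids):
--     ids = sorted(future_ids)
--     max_lcp = 0
--     for prev, cur in zip(ids, ids[1:]):
--         l = 0
--         m = min(len(prev), len(cur))
--         while l < m and prev[l] == cur[l]:
--             l += 1
--         if l > max_lcp:
--             max_lcp = l
--     n = max(8, max_lcp + 1)  # 8 == len("bn_fut_") + 1
--     return {fid: fid[:n] for fid in future_ids}
-- ===== Notes on version B (the rewrite author's own statement) =====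
-- stated objective: faster
-- what changed: Instead of growing the prefix length one character at a time and rebuilding the whole prefix set at each candidate length, B sorts the ids once, takes the maximum longest-common-prefix of adjacent sorted ids, and uses max(8, 1+that) as the truncation length directly.
import Mathlib
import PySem

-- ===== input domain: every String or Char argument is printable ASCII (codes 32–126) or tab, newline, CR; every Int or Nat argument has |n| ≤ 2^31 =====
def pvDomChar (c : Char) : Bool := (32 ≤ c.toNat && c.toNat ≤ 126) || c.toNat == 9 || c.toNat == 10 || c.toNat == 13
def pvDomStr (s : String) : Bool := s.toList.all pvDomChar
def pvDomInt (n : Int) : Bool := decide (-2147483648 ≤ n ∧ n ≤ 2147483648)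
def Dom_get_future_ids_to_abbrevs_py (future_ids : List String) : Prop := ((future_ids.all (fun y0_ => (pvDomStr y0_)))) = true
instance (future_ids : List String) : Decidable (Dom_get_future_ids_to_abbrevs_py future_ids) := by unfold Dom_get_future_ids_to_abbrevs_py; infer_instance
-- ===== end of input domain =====

-- B replaces A's linear search over candidate prefix lengths (rebuilding the whole prefix set at
-- every length) by one sort plus the maximum longest-common-prefix of adjacent sorted ids
-- (truncation length = max(8, 1 + that)); objective: faster.

-- ===== PORT A =====
-- the 'for abbrev_len in range(...): ... break' loop of A (returns the first hit, else the default fid_len)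
def pvALoop (future_ids : List String) : List Int → Int → Int
  | [], fid_len => fid_len
  | abbrev_len :: rest, fid_len =>
    if (PySem.Set.ofList (future_ids.map (fun fid => PySem.Str.slice fid (some 0) (some abbrev_len)))).length
        = future_ids.length
    then abbrev_len
    else pvALoop future_ids rest fid_len

def get_future_ids_to_abbrevs_py (future_ids : List String) : List (String × String) :=
  if future_ids.length = 0 then []
  else
    match PySem.List.max? (future_ids.map (fun fid => PySem.Str.len fid)) (fun x => x) with
    | none => []  -- unreachable: the list of lengths is nonempty here
    | some fid_len0 =>
      let fid_len := pvALoop future_ids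
        (PySem.List.pyRange (PySem.Str.len "bn_fut_" + 1) (fid_len0 + 1) 1) fid_len0
      future_ids.map (fun fid => (fid, PySem.Str.slice fid (some 0) (some fid_len)))

-- ===== PORT B =====
-- the inner 'while l < m and prev[l] == cur[l]: l += 1' scan of Source B, as structural recursion
def pvLcp : List Char → List Char → Nat
  | a :: as, b :: bs => if a = b then pvLcp as bs + 1 else 0
  | _, _ => 0

def get_future_ids_to_abbrevs_py_alt (future_ids : List String) : List (String × String) :=
  let ids := PySem.List.sorted future_ids (fun x => x) false
  let maxLcp := (ids.zip ids.tail).foldl (fun acc pc => max acc (pvLcp pc.1.toList pc.2.toList)) 0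
  let n := max 8 (maxLcp + 1)
  future_ids.map (fun fid => (fid, PySem.Str.slice fid none (some (n : Int))))

-- ===== PRECONDITION & SPEC =====
-- The Python parameter is a set (Set[FutureId]); under the type convention a set is encoded as a
-- list of DISTINCT elements, so Pre_ requires exactly that — a list with duplicates encodes no set.
def Pre_get_future_ids_to_abbrevs_py (future_ids : List String) : Prop := future_ids.Nodup
instance (future_ids : List String) : Decidable (Pre_get_future_ids_to_abbrevs_py future_ids) := by unfold Pre_get_future_ids_to_abbrevs_py; infer_instance

def pvWitness_get_future_ids_to_abbrevs_py : List String := ["bn_fut_0ab", "bn_fut_1cd", "x"]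

def Spec_get_future_ids_to_abbrevs_py (future_ids : List String) (out : List (String × String)) : Prop := out = get_future_ids_to_abbrevs_py_alt future_ids
instance (future_ids : List String) (out : List (String × String)) : Decidable (Spec_get_future_ids_to_abbrevs_py future_ids out) := by unfold Spec_get_future_ids_to_abbrevs_py; infer_instance

-- ===== CLAIM (what is proved, stated in full; the proofs are below) =====
def Claim_equal_get_future_ids_to_abbrevs_py : Prop := ∀ (future_ids : List String), Dom_get_future_ids_to_abbrevs_py future_ids → Pre_get_future_ids_to_abbrevs_py future_ids → Spec_get_future_ids_to_abbrevs_py future_ids (get_future_ids_to_abbrevs_py future_ids)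

-- ===== LEMMAS AND PROOFS =====

-- equal prefixes up to the common-prefix length
theorem pv_take_eq_of_le_lcp (a : List Char) : ∀ (b : List Char) (k : Nat),
    k ≤ pvLcp a b → a.take k = b.take k := by
  induction a with
  | nil =>
    intro b k hk
    cases b <;> simp [pvLcp] at hk <;> simp [hk]
  | cons x as ih =>
    intro b k hk
    cases b with
    | nil => simp [pvLcp] at hk; simp [hk]
    | cons y bs =>
      by_cases hxy : x = y
      · subst hxy
        cases k with
        | zero => simp
        | succ j =>
          simp [pvLcp] at hk
          simp only [List.take_succ_cons]
          rw [ih bs j (by omega)]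
      · simp [pvLcp, hxy] at hk
        simp [hk]

-- order of prefixes past the common-prefix length
theorem pv_take_lex_of_lex {a b : List Char} (h : List.Lex (· < ·) a b) :
    ∀ k : Nat, pvLcp a b < k → List.Lex (· < ·) (a.take k) (b.take k) := by
  induction h with
  | nil =>
    intro k hk
    cases k with
    | zero => simp [pvLcp] at hk
    | succ j => exact List.Lex.nil
  | @rel x xs y ys hxy =>
    intro k hk
    have hne : x ≠ y := ne_of_lt hxy
    cases k with
    | zero => simp [pvLcp, hne] at hk
    | succ j => exact List.Lex.rel hxy
  | @cons x xs ys _ ih =>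
    intro k hk
    cases k with
    | zero => simp [pvLcp] at hk
    | succ j =>
      simp [pvLcp] at hk
      exact List.Lex.cons (ih j (by omega))

-- the common prefix of two distinct lists is shorter than the longer one
theorem pv_lcp_lt_max (a : List Char) : ∀ b : List Char, a ≠ b →
    pvLcp a b < max a.length b.length := by
  induction a with
  | nil =>
    intro b hne
    cases b with
    | nil => exact absurd rfl hne
    | cons y bs => simp [pvLcp]
  | cons x as ih =>
    intro b hne
    cases b with
    | nil => simp [pvLcp]
    | cons y bs =>
      by_cases hxy : x = y
      · have hne' : as ≠ bs := by
          intro h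
          exact hne (by rw [hxy, h])
        have hlt := ih bs hne'
        have hred : pvLcp (x :: as) (y :: bs) = pvLcp as bs + 1 := by simp [pvLcp, hxy]
        rw [hred]
        simp only [List.length_cons]
        omega
      · simp [pvLcp, hxy]

-- adjacent pairs of a strictly sorted list are strictly ordered
theorem pv_zip_lt {α : Type} [Preorder α] : ∀ (s : List α), s.Pairwise (· < ·) →
    ∀ pc ∈ s.zip s.tail, pc.1 < pc.2 := by
  intro s
  induction s with
  | nil => intro _ pc hpc; exact absurd hpc (by simp)
  | cons a rest ih =>
    intro hpw pc hpc
    cases rest with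
    | nil => exact absurd hpc (by simp)
    | cons b r =>
      simp only [List.tail_cons, List.zip_cons_cons, List.mem_cons] at hpc
      rcases hpc with h | h
      · subst h
        exact (List.pairwise_cons.mp hpw).1 b (by simp)
      · exact ih (List.pairwise_cons.mp hpw).2 pc h

-- prefix-truncation at k keeps a strictly sorted list strictly increasing when k exceeds all adjacent lcps
theorem pv_chain_take (k : Nat) : ∀ (s : List String), s.Pairwise (· < ·) →
    (∀ pc ∈ s.zip s.tail, pvLcp pc.1.toList pc.2.toList < k) →
    List.IsChain (fun a b : String => a.toList.take k < b.toList.take k) s := by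
  intro s
  induction s with
  | nil => intro _ _; simp
  | cons a rest ih =>
    intro hpw hadj
    cases rest with
    | nil => simp
    | cons b r =>
      refine List.IsChain.cons_cons ?_ (ih (List.pairwise_cons.mp hpw).2 ?_)
      · have hab : a < b := (List.pairwise_cons.mp hpw).1 b (by simp)
        have hlex : List.Lex (· < ·) a.toList b.toList :=
          (List.lt_iff_lex_lt _ _).mp (String.lt_iff_toList_lt.mp hab)
        have hlcp : pvLcp a.toList b.toList < k := hadj (a, b) (by simp)
        exact (List.lt_iff_lex_lt _ _).mpr (pv_take_lex_of_lex hlex k hlcp)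
      · intro pc hpc
        refine hadj pc ?_
        simp only [List.tail_cons, List.zip_cons_cons, List.mem_cons]
        right
        exact hpc

-- on a strictly sorted list, the truncated ids are distinct iff k exceeds every adjacent lcp
theorem pv_nodup_map_take_iff (k : Nat) (s : List String) (hpw : s.Pairwise (· < ·)) :
    (s.map (fun t => t.toList.take k)).Nodup ↔
      ∀ pc ∈ s.zip s.tail, pvLcp pc.1.toList pc.2.toList < k := by
  constructor
  · intro hnd
    induction s with
    | nil => intro pc hpc; exact absurd hpc (by simp)
    | cons a rest ih =>
      intro pc hpc
      cases rest with
      | nil => exact absurd hpc (by simp)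
      | cons b r =>
        simp only [List.tail_cons, List.zip_cons_cons, List.mem_cons] at hpc
        rcases hpc with h | h
        · subst h
          by_contra hge
          have hge' : k ≤ pvLcp (a, b).1.toList (a, b).2.toList := Nat.le_of_not_lt hge
          simp only at hge'
          have heq : a.toList.take k = b.toList.take k := pv_take_eq_of_le_lcp _ _ _ hge'
          rw [List.map_cons, List.map_cons, List.nodup_cons] at hnd
          exact hnd.1 (by rw [heq]; exact List.mem_cons_self ..)
        · refine ih (List.pairwise_cons.mp hpw).2 ?_ pc h
          rw [List.map_cons, List.nodup_cons] at hnd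
          exact hnd.2
  · intro hadj
    have hch : List.IsChain (fun a b : String => a.toList.take k < b.toList.take k) s :=
      pv_chain_take k s hpw hadj
    have hch' : List.IsChain (· < ·) (s.map (fun t => t.toList.take k)) :=
      (List.isChain_map _).mpr hch
    exact hch'.pairwise.imp ne_of_lt

-- Set.ofList preserves length exactly on duplicate-free lists
theorem pv_ofList_length_iff (xs : List String) :
    (PySem.Set.ofList xs).length = xs.length ↔ xs.Nodup := by
  constructor
  · intro h
    have hperm : (PySem.Set.ofList xs).Perm xs.dedup :=
      (List.perm_ext_iff_of_nodup (PySem.Set.nodup_ofList xs) xs.nodup_dedup).mpr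
        (fun a => by rw [PySem.Set.mem_ofList, List.mem_dedup])
    have hlen : xs.dedup.length = xs.length := by rw [← hperm.length_eq, h]
    have : xs.dedup = xs := (List.dedup_sublist xs).eq_of_length hlen
    exact List.dedup_eq_self.mp this
  · intro h
    rw [PySem.Set.ofList_eq_self_of_nodup xs h]

-- A's loop: skip a block of failing candidates
theorem pv_loop_skip (l : List String) (ks1 ks2 : List Int) (d : Int)
    (h : ∀ k ∈ ks1,
      ¬ ((PySem.Set.ofList (l.map (fun fid => PySem.Str.slice fid (some 0) (some k)))).length
          = l.length)) :
    pvALoop l (ks1 ++ ks2) d = pvALoop l ks2 d := by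
  induction ks1 with
  | nil => simp
  | cons k rest ih =>
    simp only [List.cons_append, pvALoop]
    rw [if_neg (h k (by simp)), ih (fun k' hk' => h k' (by simp [hk']))]

theorem pv_str_slice_toList (s : String) (i : Int) (h : 0 ≤ i) :
    (PySem.Str.slice s (some 0) (some i)).toList = s.toList.take i.toNat := by
  simp only [PySem.Str.toList_slice, PySem.Chars.slice_eq_listSlice,
    PySem.List.slice_zero_start, PySem.List.slice_to _ h]

theorem pv_str_slice_none_toList (s : String) (i : Int) (h : 0 ≤ i) :
    (PySem.Str.slice s none (some i)).toList = s.toList.take i.toNat := by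
  simp only [PySem.Str.toList_slice, PySem.Chars.slice_eq_listSlice, PySem.List.slice_to _ h]

-- A's set-cardinality test is exactly "the truncated ids are pairwise distinct"
theorem pv_cond_iff (l : List String) (k : Int) (hk : 0 ≤ k) :
    ((PySem.Set.ofList (l.map (fun fid => PySem.Str.slice fid (some 0) (some k)))).length
        = l.length)
      ↔ (l.map (fun t => t.toList.take k.toNat)).Nodup := by
  rw [show l.length = (l.map (fun fid => PySem.Str.slice fid (some 0) (some k))).length by
        simp]
  rw [pv_ofList_length_iff]
  have hmap : l.map (fun t => t.toList.take k.toNat)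
      = (l.map (fun fid => PySem.Str.slice fid (some 0) (some k))).map String.toList := by
    rw [List.map_map]
    exact List.map_congr_left (fun t _ => (pv_str_slice_toList t k hk).symm)
  rw [hmap]
  exact (List.nodup_map_iff (fun _ _ h => String.toList_inj.mp h)).symm

-- the main equivalence
theorem pv_main (l : List String) (hpre : l.Nodup) :
    get_future_ids_to_abbrevs_py l = get_future_ids_to_abbrevs_py_alt l := by
  by_cases hnil : l = []
  · subst hnil
    simp [get_future_ids_to_abbrevs_py, get_future_ids_to_abbrevs_py_alt]
  · have hlen0 : ¬ (l.length = 0) := fun h => hnil (List.eq_nil_of_length_eq_zero h)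
    obtain ⟨m, hm⟩ : ∃ m, PySem.List.max? (l.map (fun fid => PySem.Str.len fid)) (fun x => x)
        = some m := by
      cases hmx : PySem.List.max? (l.map (fun fid => PySem.Str.len fid)) (fun x => x) with
      | none =>
        exfalso
        have := (PySem.List.max?_eq_none_iff _ _).mp hmx
        simp at this
        exact hnil this
      | some m => exact ⟨m, rfl⟩
    have hlit : PySem.Str.len "bn_fut_" + 1 = 8 := by decide
    -- expand both ports
    have hA : get_future_ids_to_abbrevs_py l
        = l.map (fun fid => (fid, PySem.Str.slice fid (some 0)
            (some (pvALoop l (PySem.List.pyRange 8 (m + 1) 1) m)))) := by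
      unfold get_future_ids_to_abbrevs_py
      rw [if_neg hlen0, hm, hlit]
    have hB : get_future_ids_to_abbrevs_py_alt l
        = l.map (fun fid => (fid, PySem.Str.slice fid none
            (some ((max 8 ((((PySem.List.sorted l (fun x => x) false).zip
              (PySem.List.sorted l (fun x => x) false).tail).foldl
                (fun acc pc => max acc (pvLcp pc.1.toList pc.2.toList)) 0) + 1) : Nat) : Int)))) := rfl
    rw [hA, hB]
    set s := PySem.List.sorted l (fun x => x) false with hs
    set madj := (s.zip s.tail).foldl (fun acc pc => max acc (pvLcp pc.1.toList pc.2.toList)) 0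
      with hmadj
    set n : Nat := max 8 (madj + 1) with hn
    -- facts about the sorted list
    have hperm : s.Perm l := hs ▸ PySem.List.sorted_perm l (fun x => x) false
    have hsnd : s.Nodup := (hperm.nodup_iff).mpr hpre
    have hple : s.Pairwise (· ≤ ·) := by
      have := PySem.List.sorted_pairwise l (fun x => x)
      rw [hs]
      simpa using this
    have hplt : s.Pairwise (· < ·) :=
      (hple.and hsnd).imp (fun h => lt_of_le_of_ne h.1 h.2)
    -- facts about the maximal length m
    have hm_ub : ∀ fid ∈ l, (fid.toList.length : Int) ≤ m := by
      intro fid hfid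
      have := PySem.List.max?_isMax hm (PySem.Str.len fid)
        (List.mem_map.mpr ⟨fid, hfid, rfl⟩)
      simpa [pysem] using this
    have hm_nonneg : 0 ≤ m := by
      have := PySem.List.max?_mem hm
      simp only [List.mem_map] at this
      obtain ⟨fid, _, hlen⟩ := this
      have : PySem.Str.len fid = (fid.toList.length : Int) := by simp [pysem]
      omega
    -- the fold computing madj
    have hfold : ((s.zip s.tail).map
        (fun pc : String × String => pvLcp pc.1.toList pc.2.toList)).foldl max 0 = madj := by
      rw [List.foldl_map]
    -- A's distinctness test characterised by madj
    have hPiff : ∀ k : Nat, 0 < k →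
        ((l.map (fun t => t.toList.take k)).Nodup ↔ madj < k) := by
      intro k hkpos
      have htrans : (l.map (fun t => t.toList.take k)).Nodup
          ↔ (s.map (fun t => t.toList.take k)).Nodup :=
        (List.Perm.nodup_iff (hperm.map _)).symm
      rw [htrans, pv_nodup_map_take_iff k s hplt]
      constructor
      · intro hadj
        rcases PySem.List.foldl_max_mem ((s.zip s.tail).map
            (fun pc : String × String => pvLcp pc.1.toList pc.2.toList)) 0 with h0 | hmem
        · rw [hfold] at h0
          omega
        · rw [hfold] at hmem
          simp only [List.mem_map] at hmem
          obtain ⟨pc, hpc, hval⟩ := hmem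
          rw [← hval]
          exact hadj pc hpc
      · intro hlt pc hpc
        have hle : pvLcp pc.1.toList pc.2.toList ≤ madj :=
          (PySem.List.le_foldl_max_nat (s.zip s.tail)
            (fun pc : String × String => pvLcp pc.1.toList pc.2.toList) 0).2 pc hpc
        omega
    -- madj is below the maximal length (and below 8 if everything is short)
    have hmadj_lt : (madj : Int) < max 8 m := by
      rcases PySem.List.foldl_max_mem ((s.zip s.tail).map
          (fun pc : String × String => pvLcp pc.1.toList pc.2.toList)) 0 with h0 | hmem
      · rw [hfold] at h0
        omega
      · rw [hfold] at hmem
        simp only [List.mem_map] at hmem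
        obtain ⟨pc, hpc, hval⟩ := hmem
        have hltp : pc.1 < pc.2 := pv_zip_lt s hplt pc hpc
        have hne : pc.1.toList ≠ pc.2.toList := by
          intro h
          exact absurd (String.toList_inj.mp h) (ne_of_lt hltp)
        have hbound := pv_lcp_lt_max pc.1.toList pc.2.toList hne
        have hmem1 : pc.1 ∈ l := hperm.mem_iff.mp (List.of_mem_zip hpc).1
        have hmem2 : pc.2 ∈ l := hperm.mem_iff.mp
          (List.mem_of_mem_tail (List.of_mem_zip hpc).2)
        have hb1 := hm_ub pc.1 hmem1
        have hb2 := hm_ub pc.2 hmem2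
        omega
    by_cases hm8 : m + 1 ≤ 8
    · -- all ids shorter than 8 characters: the loop range is empty, both sides keep full ids
      rw [PySem.List.pyRange_one_eq_nil hm8]
      have h8n : 8 ≤ n := le_max_left _ _
      refine List.map_congr_left ?_
      intro fid hfid
      have hlenle : (fid.toList.length : Int) ≤ m := hm_ub fid hfid
      have h1 : (PySem.Str.slice fid (some 0) (some (pvALoop l [] m))).toList = fid.toList := by
        show (PySem.Str.slice fid (some 0) (some m)).toList = fid.toList
        exact (pv_str_slice_toList fid m hm_nonneg).trans
          (List.take_of_length_le (by omega))
      have h2 : (PySem.Str.slice fid none (some (n : Int))).toList = fid.toList :=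
        (pv_str_slice_none_toList fid n (Int.natCast_nonneg n)).trans
          (List.take_of_length_le (by omega))
      exact Prod.ext rfl (String.toList_inj.mp (h1.trans h2.symm))
    · -- general case: the loop stops exactly at n = max 8 (madj + 1)
      have h8m : (8 : Int) ≤ m := by omega
      have hmaxm : max 8 m = m := by omega
      rw [hmaxm] at hmadj_lt
      have hn8 : (8 : Int) ≤ (n : Int) := by omega
      have hnm : (n : Int) ≤ m := by omega
      rw [PySem.List.pyRange_one_append 8 (n : Int) (m + 1) hn8 (by omega)]
      rw [pv_loop_skip l _ _ m ?fail]
      case fail =>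
        intro k hk
        rw [PySem.List.mem_pyRange_one] at hk
        rw [pv_cond_iff l k (by omega)]
        rw [hPiff k.toNat (by omega)]
        omega
      rw [PySem.List.pyRange_one_cons (by omega : (n : Int) < m + 1)]
      have hcond : ((PySem.Set.ofList (l.map (fun fid =>
          PySem.Str.slice fid (some 0) (some (n : Int))))).length = l.length) := by
        rw [pv_cond_iff l (n : Int) (Int.natCast_nonneg n)]
        rw [show ((n : Int)).toNat = n from by omega]
        rw [hPiff n (by omega)]
        omega
      have hloopn : pvALoop l ((n : Int) :: PySem.List.pyRange ((n : Int) + 1) (m + 1) 1) m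
          = (n : Int) := by
        simp only [pvALoop]
        rw [if_pos hcond]
      rw [hloopn]
      refine List.map_congr_left ?_
      intro fid _
      refine Prod.ext rfl (String.toList_inj.mp ?_)
      rw [pv_str_slice_toList fid (n : Int) (Int.natCast_nonneg n),
        pv_str_slice_none_toList fid (n : Int) (Int.natCast_nonneg n)]

-- ===== VERDICT (by name: the statement is the Claim_ definition above) =====
theorem get_future_ids_to_abbrevs_py_spec : Claim_equal_get_future_ids_to_abbrevs_py := by
  intro l _ hpre
  exact pv_main l hpre
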